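-- pv_equiv track=rewrite | github.com/ankitasumeet17/CS303E | RecursiveFunctions.py | findFirstUppercaseIndexHelper
-- ===== SOURCE A (Python) =====
-- def findFirstUppercaseIndexHelper( s, index ):
--    # Helper function for findFirstUppercaseIndex
--    if not s:
--        return -1
--    elif index + 1 > len(s):
--        return -1
--    elif chr(65) <= s[index] <= chr(90):
--        return index
--    else:
--        return findFirstUppercaseIndexHelper( s , index + 1 )
-- ===== SOURCE B (Python) =====
-- def findFirstUppercaseIndexHelper(s, index):
--     # Iterative scan from `index` to the end; same result as the recursive version.
--     if not s:
--         return -1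
--     for i in range(index, len(s)):
--         if 'A' <= s[i] <= 'Z':
--             return i
--     return -1
-- ===== Notes on version B (the rewrite author's own statement) =====
-- stated objective: simpler
-- what changed: Replaced the recursion on index with a single iterative for-loop over range(index, len(s)) that returns at the first uppercase character.
import Mathlib
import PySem

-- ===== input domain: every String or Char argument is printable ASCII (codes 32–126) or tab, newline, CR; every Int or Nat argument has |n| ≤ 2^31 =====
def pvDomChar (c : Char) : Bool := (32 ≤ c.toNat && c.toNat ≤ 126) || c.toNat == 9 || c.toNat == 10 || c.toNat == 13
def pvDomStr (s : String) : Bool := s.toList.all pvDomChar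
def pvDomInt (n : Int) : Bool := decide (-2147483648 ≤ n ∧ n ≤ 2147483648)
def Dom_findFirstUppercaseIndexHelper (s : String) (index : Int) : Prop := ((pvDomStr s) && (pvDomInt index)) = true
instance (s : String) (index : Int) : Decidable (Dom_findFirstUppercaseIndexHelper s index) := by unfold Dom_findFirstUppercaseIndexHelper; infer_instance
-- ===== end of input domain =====

-- B replaces A's recursion by one iterative scan over range(index, len(s)); equivalence is about the return value.

-- ===== PORT A =====
-- Literal port of A's recursion; the `none` branch of pyGet? is Python's IndexError, excluded by Pre_.
def findFirstUppercaseIndexHelper (s : String) (index : Int) : Int :=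
  if s.toList = [] then -1
  else if index + 1 > PySem.Str.len s then -1
  else
    match PySem.Str.pyGet? s index with
    | none => -1  -- IndexError in Python (index < -len); outside Pre_
    | some c =>
      if 'A' ≤ c ∧ c ≤ 'Z' then index
      else findFirstUppercaseIndexHelper s (index + 1)
termination_by (PySem.Str.len s - index).toNat
decreasing_by
  simp only [PySem.Str.len_eq] at *
  omega

-- ===== PORT B =====
-- The for-loop of Source B over range(index, len(s)); `none` again marks Python's IndexError.
def pvAltScan (s : String) : List Int → Int
  | [] => -1
  | i :: rest =>
    match PySem.Str.pyGet? s i with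
    | none => -1  -- IndexError in Python; outside Pre_
    | some c => if 'A' ≤ c ∧ c ≤ 'Z' then i else pvAltScan s rest

def findFirstUppercaseIndexHelper_alt (s : String) (index : Int) : Int :=
  if s.toList = [] then -1
  else pvAltScan s (PySem.List.pyRange index (PySem.Str.len s) 1)

-- ===== PRECONDITION & SPEC =====
-- Pre_ excludes exactly the inputs where Python A raises IndexError: nonempty s with index < -len(s).
def Pre_findFirstUppercaseIndexHelper (s : String) (index : Int) : Prop :=
  s.toList = [] ∨ -(s.toList.length : Int) ≤ index
instance (s : String) (index : Int) : Decidable (Pre_findFirstUppercaseIndexHelper s index) := by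
  unfold Pre_findFirstUppercaseIndexHelper; infer_instance

def pvWitness_findFirstUppercaseIndexHelper : String × Int := ("aB", 0)

def Spec_findFirstUppercaseIndexHelper (s : String) (index : Int) (out : Int) : Prop := out = findFirstUppercaseIndexHelper_alt s index
instance (s : String) (index : Int) (out : Int) : Decidable (Spec_findFirstUppercaseIndexHelper s index out) := by unfold Spec_findFirstUppercaseIndexHelper; infer_instance

-- ===== CLAIM (what is proved, stated in full; the proofs are below) =====
def Claim_equal_findFirstUppercaseIndexHelper : Prop := ∀ (s : String) (index : Int), Dom_findFirstUppercaseIndexHelper s index → Pre_findFirstUppercaseIndexHelper s index → Spec_findFirstUppercaseIndexHelper s index (findFirstUppercaseIndexHelper s index)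

-- ===== LEMMAS AND PROOFS =====

theorem pvKey (s : String) (index : Int) (hlo : -(s.toList.length : Int) ≤ index) :
    findFirstUppercaseIndexHelper s index
      = pvAltScan s (PySem.List.pyRange index (PySem.Str.len s) 1) := by
  by_cases hne : s.toList = []
  · rw [findFirstUppercaseIndexHelper]
    have h0 : (0:Int) ≤ index := by rw [hne] at hlo; simpa using hlo
    have hlen : PySem.Str.len s = 0 := by simp [PySem.Str.len_eq, hne]
    simp only [hne]
    rw [hlen, PySem.List.pyRange_one_eq_nil h0]
    rfl
  · rw [findFirstUppercaseIndexHelper]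
    simp only [hne]
    by_cases hbig : index + 1 > PySem.Str.len s
    · rw [if_pos hbig]
      rw [PySem.List.pyRange_one_eq_nil (by simp only [PySem.Str.len_eq] at hbig ⊢; omega)]
      rfl
    · rw [if_neg hbig]
      simp only [PySem.Str.len_eq] at hbig hlo
      have hlt : index < (s.toList.length : Int) := by omega
      rw [show PySem.Str.len s = ((s.toList.length : Int)) from by simp [PySem.Str.len_eq],
          PySem.List.pyRange_one_cons hlt]
      simp only [pvAltScan]
      cases hg : PySem.Str.pyGet? s index with
      | none =>
        exfalso
        have h2 : PySem.List.pyGet? s.toList index = none := by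
          simpa [PySem.Str.pyGet?, PySem.Chars.pyGet?] using hg
        rw [PySem.List.pyGet?_eq_none_iff] at h2
        exact h2 ⟨hlo, hlt⟩
      | some c =>
        by_cases hc : 'A' ≤ c ∧ c ≤ 'Z'
        · simp [hc]
        · simp only [if_neg hc]
          have := pvKey s (index + 1) (by omega)
          rw [this]
          simp [PySem.Str.len_eq]
termination_by (PySem.Str.len s - index).toNat
decreasing_by
  simp only [PySem.Str.len_eq] at *
  omega

-- ===== VERDICT (by name: the statement is the Claim_ definition above) =====
theorem findFirstUppercaseIndexHelper_spec : Claim_equal_findFirstUppercaseIndexHelper := by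
  intro s index _ hpre
  unfold Spec_findFirstUppercaseIndexHelper findFirstUppercaseIndexHelper_alt
  by_cases hne : s.toList = []
  · rw [if_pos hne, findFirstUppercaseIndexHelper]
    simp [hne]
  · rw [if_neg hne]
    rcases hpre with h | h
    · exact absurd h hne
    · exact pvKey s index h
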